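-- pv_equiv track=rewrite | github.com/BarIfrah/Homework | seagateEx2.py | calc_ladder_steps_with_dictionary_values
-- ===== SOURCE A (Python) =====
-- def calc_ladder_steps_with_dictionary_values(curr_step, steps_dict):
--     """
--     This function is the improvement for ex 1 a.
--     When running multiple times, a kind of database is necessary to save some computations.
--     So, we create a dict, with the computed times and check if the value reached in the recursion is in the dict.
--     If so, we return it's value, instead of running the recursive computations again.
--     :param curr_step:
--     :param steps_dict
--     :return:
--     """
--     if curr_step == 1:
--         return 1
--     elif curr_step == 2:
--         return 2
--     elif curr_step in steps_dict:
--         return steps_dict[curr_step]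
--     return calc_ladder_steps_with_dictionary_values(curr_step - 1, steps_dict) + \
--            calc_ladder_steps_with_dictionary_values(curr_step - 2, steps_dict)
-- ===== SOURCE B (Python) =====
-- def calc_ladder_steps_with_dictionary_values(curr_step, steps_dict):
--     if curr_step == 1:
--         return 1
--     if curr_step == 2:
--         return 2
--     if curr_step in steps_dict:
--         return steps_dict[curr_step]
--     a, b = 1, 2
--     for k in range(3, curr_step + 1):
--         a, b = b, steps_dict.get(k, a + b)
--     return b
-- ===== Notes on version B (the rewrite author's own statement) =====
-- stated objective: alternative
-- what changed: Replaced the exponential two-branch recursion by an iterative bottom-up DP: one pass k = 3..curr_step keeping the last two values, with each step's value taken from the dict override if present; asymptotically better on key-free inputs (where A times out already at n=256), comparable when the dict cuts A's recursion.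
-- outside the precondition, e.g. on calc_ladder_steps_with_dictionary_values(0, {-1: 5, -2: 7}): A returns 12, B returns 2
import Mathlib
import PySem

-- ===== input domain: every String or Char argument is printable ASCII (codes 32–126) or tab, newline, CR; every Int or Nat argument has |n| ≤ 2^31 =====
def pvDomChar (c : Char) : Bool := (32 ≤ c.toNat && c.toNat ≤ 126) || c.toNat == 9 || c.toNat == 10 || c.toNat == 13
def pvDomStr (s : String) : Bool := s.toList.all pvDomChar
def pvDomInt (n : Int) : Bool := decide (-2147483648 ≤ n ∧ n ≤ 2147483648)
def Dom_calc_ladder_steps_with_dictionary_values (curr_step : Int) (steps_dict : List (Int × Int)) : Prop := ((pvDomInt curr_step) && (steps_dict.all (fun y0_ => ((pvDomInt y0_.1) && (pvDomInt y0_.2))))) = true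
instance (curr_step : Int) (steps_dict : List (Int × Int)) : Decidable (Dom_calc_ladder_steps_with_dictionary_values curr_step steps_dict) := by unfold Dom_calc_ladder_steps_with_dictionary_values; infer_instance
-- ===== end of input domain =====

-- B replaces A's exponential double recursion by one bottom-up pass keeping the last two values (dict overrides read per step).

-- ===== PORT A =====
-- Literal transliteration of A's recursion; the fuel argument only makes the
-- recursion total in Lean (under Pre_ it is always large enough, so it never changes the value).
def pvAGo (steps_dict : List (Int × Int)) : Nat → Int → Int
  | 0, _ => 0
  | fuel+1, n =>
    if n = 1 then 1
    else if n = 2 then 2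
    else
      match (PySem.Dict.mk steps_dict).get? n with
      | some v => v
      | none => pvAGo steps_dict fuel (n - 1) + pvAGo steps_dict fuel (n - 2)

def calc_ladder_steps_with_dictionary_values (curr_step : Int) (steps_dict : List (Int × Int)) : Int :=
  pvAGo steps_dict (curr_step.toNat + 1) curr_step

-- ===== PORT B =====
def calc_ladder_steps_with_dictionary_values_alt (curr_step : Int) (steps_dict : List (Int × Int)) : Int :=
  if curr_step = 1 then 1
  else if curr_step = 2 then 2
  else
    match (PySem.Dict.mk steps_dict).get? curr_step with
    | some v => v
    | none =>
      ((PySem.List.pyRange 3 (curr_step + 1) 1).foldl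
        (fun (ab : Int × Int) k => (ab.2, (PySem.Dict.mk steps_dict).getD k (ab.1 + ab.2)))
        (1, 2)).2

-- ===== PRECONDITION & SPEC =====
-- Pre_ excludes exactly the inputs on which A's unbounded double recursion does not return a
-- value: curr_step ≤ 0 that is not itself a key (A recurses downward past the base cases and
-- raises RecursionError, except when the overrides happen to cover the whole descent, where it
-- returns an accidental sum of override values — see the cited example), and curr_step more
-- than 900 above every ADJACENT pair of stoppers (base steps 1,2 or dict keys b, b+1), where
-- A's descent — which steps by 1 or 2 and can only be blocked by two adjacent stoppers —
-- exceeds CPython's recursion limit and raises RecursionError.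
def pvStopper (steps_dict : List (Int × Int)) (m : Int) : Bool :=
  m == 1 || m == 2 || ((PySem.Dict.mk steps_dict).get? m).isSome
def Pre_calc_ladder_steps_with_dictionary_values (curr_step : Int) (steps_dict : List (Int × Int)) : Prop :=
  ((PySem.Dict.mk steps_dict).get? curr_step).isSome = true ∨
  (1 ≤ curr_step ∧ ∃ b ∈ (1 :: steps_dict.map Prod.fst),
    pvStopper steps_dict b = true ∧ pvStopper steps_dict (b + 1) = true ∧ b ≤ curr_step ∧ curr_step - b ≤ 900)
instance (curr_step : Int) (steps_dict : List (Int × Int)) : Decidable (Pre_calc_ladder_steps_with_dictionary_values curr_step steps_dict) := by unfold Pre_calc_ladder_steps_with_dictionary_values; infer_instance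

def pvWitness_calc_ladder_steps_with_dictionary_values : Int × (List (Int × Int)) := (10, [(5, 100)])

def Spec_calc_ladder_steps_with_dictionary_values (curr_step : Int) (steps_dict : List (Int × Int)) (out : Int) : Prop := out = calc_ladder_steps_with_dictionary_values_alt curr_step steps_dict
instance (curr_step : Int) (steps_dict : List (Int × Int)) (out : Int) : Decidable (Spec_calc_ladder_steps_with_dictionary_values curr_step steps_dict out) := by unfold Spec_calc_ladder_steps_with_dictionary_values; infer_instance

-- ===== CLAIM (what is proved, stated in full; the proofs are below) =====
def Claim_equal_calc_ladder_steps_with_dictionary_values : Prop := ∀ (curr_step : Int) (steps_dict : List (Int × Int)), Dom_calc_ladder_steps_with_dictionary_values curr_step steps_dict → Pre_calc_ladder_steps_with_dictionary_values curr_step steps_dict → Spec_calc_ladder_steps_with_dictionary_values curr_step steps_dict (calc_ladder_steps_with_dictionary_values curr_step steps_dict)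

-- ===== LEMMAS AND PROOFS =====

-- pvG d m = (value at step m+1, value at step m+2) of the intended recurrence.
def pvG (steps_dict : List (Int × Int)) : Nat → Int × Int
  | 0 => (1, 2)
  | m+1 => ((pvG steps_dict m).2,
            (PySem.Dict.mk steps_dict).getD ((m : Int) + 3) ((pvG steps_dict m).1 + (pvG steps_dict m).2))

def pvVal (steps_dict : List (Int × Int)) (m : Nat) : Int := (pvG steps_dict (m - 1)).1

theorem pvVal_succ_succ (d : List (Int × Int)) (m : Nat) : pvVal d (m + 2) = (pvG d m).2 := by
  simp [pvVal, pvG]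

theorem pvVal_rec (d : List (Int × Int)) (k : Nat) :
    pvVal d (k + 3) = (PySem.Dict.mk d).getD (((k + 3 : Nat) : Int)) (pvVal d (k + 1) + pvVal d (k + 2)) := by
  have h1 : pvVal d (k + 3) = (pvG d (k + 1)).2 := pvVal_succ_succ d (k + 1)
  have h2 : pvVal d (k + 1) = (pvG d k).1 := by simp [pvVal]
  have h3 : pvVal d (k + 2) = (pvG d k).2 := pvVal_succ_succ d k
  rw [h1, h2, h3]
  have : ((k + 3 : Nat) : Int) = (k : Int) + 3 := by push_cast; ring
  rw [this]
  rfl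

theorem pvAGo_eq (d : List (Int × Int)) :
    ∀ (f m : Nat), 1 ≤ m → m ≤ f → pvAGo d f ((m : Nat) : Int) = pvVal d m := by
  intro f
  induction f with
  | zero => intro m h1 h2; omega
  | succ f ih =>
    intro m h1 _h2
    match m, h1 with
    | 1, _ => simp [pvAGo, pvVal, pvG]
    | 2, _ => simp [pvAGo, pvVal, pvG]
    | (k+3), _ =>
      have hne1 : ((k + 3 : Nat) : Int) ≠ 1 := by push_cast; omega
      have hne2 : ((k + 3 : Nat) : Int) ≠ 2 := by push_cast; omega
      rw [pvAGo, if_neg hne1, if_neg hne2]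
      cases hd : (PySem.Dict.mk d).get? ((k + 3 : Nat) : Int) with
      | some v =>
        rw [pvVal_rec, PySem.Dict.getD_eq_get?_getD, hd]
        rfl
      | none =>
        have e1 : ((k + 3 : Nat) : Int) - 1 = ((k + 2 : Nat) : Int) := by push_cast; ring
        have e2 : ((k + 3 : Nat) : Int) - 2 = ((k + 1 : Nat) : Int) := by push_cast; ring
        rw [e1, e2, ih (k + 2) (by omega) (by omega), ih (k + 1) (by omega) (by omega),
          pvVal_rec, PySem.Dict.getD_eq_get?_getD, hd]
        simp [Int.add_comm]

theorem pvLoop_eq (d : List (Int × Int)) :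
    ∀ m : Nat, (PySem.List.pyRange 3 (((m : Nat) : Int) + 3) 1).foldl
      (fun (ab : Int × Int) k => (ab.2, (PySem.Dict.mk d).getD k (ab.1 + ab.2))) (1, 2) = pvG d m := by
  intro m
  induction m with
  | zero =>
    rw [show ((0 : Nat) : Int) + 3 = 3 by norm_num, PySem.List.pyRange_one_eq_nil (by norm_num)]
    rfl
  | succ m ih =>
    rw [show (((m + 1 : Nat)) : Int) + 3 = ((m : Int) + 3) + 1 by push_cast; ring,
      PySem.List.pyRange_one_succ_right (by omega), List.foldl_append, ih]
    rfl

-- ===== VERDICT =====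
theorem calc_ladder_steps_with_dictionary_values_spec : Claim_equal_calc_ladder_steps_with_dictionary_values := by
  intro n d _hdom hpre
  unfold Spec_calc_ladder_steps_with_dictionary_values
  by_cases h1 : n = 1
  · subst h1
    simp [calc_ladder_steps_with_dictionary_values, calc_ladder_steps_with_dictionary_values_alt, pvAGo]
  by_cases h2 : n = 2
  · subst h2
    simp [calc_ladder_steps_with_dictionary_values, calc_ladder_steps_with_dictionary_values_alt, pvAGo]
  by_cases hg : 1 ≤ n
  · -- n ≥ 3
    obtain ⟨k, hk⟩ : ∃ k : Nat, n = ((k + 3 : Nat) : Int) := by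
      refine ⟨(n - 3).toNat, ?_⟩
      push_cast
      omega
    subst hk
    have htoNat : (((k + 3 : Nat) : Int)).toNat = k + 3 := by
      rw [Int.toNat_natCast]
    have hA : calc_ladder_steps_with_dictionary_values ((k + 3 : Nat) : Int) d = pvVal d (k + 3) := by
      rw [calc_ladder_steps_with_dictionary_values, htoNat]
      exact pvAGo_eq d (k + 3 + 1) (k + 3) (by omega) (by omega)
    rw [hA, calc_ladder_steps_with_dictionary_values_alt]
    have hne1 : ((k + 3 : Nat) : Int) ≠ 1 := by push_cast; omega
    have hne2 : ((k + 3 : Nat) : Int) ≠ 2 := by push_cast; omega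
    rw [if_neg hne1, if_neg hne2]
    cases hd : (PySem.Dict.mk d).get? ((k + 3 : Nat) : Int) with
    | some v =>
      rw [pvVal_rec, PySem.Dict.getD_eq_get?_getD, hd]
      rfl
    | none =>
      have e : ((k + 3 : Nat) : Int) + 1 = (((k + 1 : Nat) : Int)) + 3 := by push_cast; ring
      rw [e, pvLoop_eq d (k + 1)]
      exact pvVal_succ_succ d (k + 1)
  · -- n ≤ 0 and n is a key of the dict
    have hs : ((PySem.Dict.mk d).get? n).isSome = true := by
      rcases hpre with h | ⟨h, -⟩
      · exact h
      · omega
    obtain ⟨v, hv⟩ := Option.isSome_iff_exists.mp hs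
    have htoNat : n.toNat = 0 := Int.toNat_of_nonpos (by omega)
    rw [calc_ladder_steps_with_dictionary_values, htoNat, pvAGo, if_neg h1, if_neg h2, hv,
      calc_ladder_steps_with_dictionary_values_alt, if_neg h1, if_neg h2, hv]
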